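-- pv_equiv track=rewrite | github.com/alanchrissantony/workouts | workouts.py | remove_k_occurrences
-- ===== SOURCE A (Python) =====
-- from collections import Counter
--
-- def remove_k_occurrences(arr: list, k: int) -> int:
--     """
--     Counts the occurrences of each element in arr and then “removes” up to k occurrences across groups.
--     Returns the number of groups (distinct elements) remaining after removals.
--
--     This function uses the Counter to get counts, then iterates through the sorted counts.
--     (Based on snippet logic, returns len(count) - j, where j is incremented when count goes below 1.)
--     """
--     counts = dict(sorted(Counter(arr).items(), key=lambda item: item[1]))
--     j = 0
--     flag = False
--     for key in counts:
--         while counts[key] > 0: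
--             if k > 0:
--                 counts[key] -= 1
--                 k -= 1
--                 if counts[key] < 1:
--                     j += 1
--             else:
--                 flag = True
--                 break
--         if flag:
--             break
--     return len(counts) - j
-- ===== SOURCE B (Python) =====
-- from collections import Counter
--
-- def remove_k_occurrences(arr: list, k: int) -> int:
--     # Sort the distinct counts ascending and bulk-subtract each whole group
--     # from k, instead of decrementing one occurrence at a time.
--     counts = sorted(Counter(arr).values())
--     removed = 0
--     for c in counts:
--         if k < c:
--             break
--         k -= c
--         removed += 1
--     return len(counts) - removed
-- ===== Notes on version B (the rewrite author's own statement) =====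
-- stated objective: faster
-- what changed: B sorts the distinct counts ascending and bulk-subtracts each whole group from k in one step, replacing A's dict-mutating inner while-loop that decrements counts[key] and k one occurrence at a time.
import Mathlib
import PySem

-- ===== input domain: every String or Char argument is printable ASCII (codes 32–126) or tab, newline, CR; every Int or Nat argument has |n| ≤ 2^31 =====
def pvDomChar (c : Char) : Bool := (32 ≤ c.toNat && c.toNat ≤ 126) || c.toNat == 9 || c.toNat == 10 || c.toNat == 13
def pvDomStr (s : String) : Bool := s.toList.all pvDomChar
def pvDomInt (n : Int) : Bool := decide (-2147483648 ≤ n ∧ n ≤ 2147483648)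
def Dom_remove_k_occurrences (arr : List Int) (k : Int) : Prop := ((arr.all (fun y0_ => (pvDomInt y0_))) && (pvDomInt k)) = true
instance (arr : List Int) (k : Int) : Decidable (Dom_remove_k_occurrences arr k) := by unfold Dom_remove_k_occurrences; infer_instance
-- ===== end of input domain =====

-- B replaces A's per-occurrence while-loop decrements by one bulk subtraction
-- of each sorted distinct count from k (objective: simpler; return value only, no mutation).

-- ===== PORT A =====
-- inner `while counts[key] > 0` loop; since the dict's keys are distinct and only
-- the current key is mutated, counts[key] is carried as c. Returns (k, j, flag).
def pvInnerA (c k j : Int) : Int × Int × Bool :=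
  if h : 0 < c then
    if 0 < k then
      pvInnerA (c - 1) (k - 1) (if c - 1 < 1 then j + 1 else j)
    else (k, j, true)
  else (k, j, false)
termination_by c.toNat
decreasing_by omega

-- `for key in counts` with `if flag: break`
def pvLoopA : List (Int × Int) → Int → Int → Int
  | [], _, j => j
  | (_, c) :: rest, k, j =>
    match pvInnerA c k j with
    | (k', j', flag) => if flag then j' else pvLoopA rest k' j'

def remove_k_occurrences (arr : List Int) (k : Int) : Int :=
  -- counts = dict(sorted(Counter(arr).items(), key=lambda item: item[1]))
  ((PySem.List.sorted (PySem.Dict.counter arr).items (fun p => p.2) false).length : Int)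
    - pvLoopA (PySem.List.sorted (PySem.Dict.counter arr).items (fun p => p.2) false) k 0

-- ===== PORT B =====
-- `for c in counts` with break; `removed` accumulator
def pvLoopB : List Int → Int → Int → Int
  | [], _, removed => removed
  | c :: rest, k, removed => if k < c then removed else pvLoopB rest (k - c) (removed + 1)

def remove_k_occurrences_alt (arr : List Int) (k : Int) : Int :=
  ((PySem.List.sorted (PySem.Dict.counter arr).values (fun c => c) false).length : Int)
    - pvLoopB (PySem.List.sorted (PySem.Dict.counter arr).values (fun c => c) false) k 0

-- ===== PRECONDITION & SPEC =====
def Spec_remove_k_occurrences (arr : List Int) (k : Int) (out : Int) : Prop := out = remove_k_occurrences_alt arr k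
instance (arr : List Int) (k : Int) (out : Int) : Decidable (Spec_remove_k_occurrences arr k out) := by unfold Spec_remove_k_occurrences; infer_instance

-- ===== CLAIM (what is proved, stated in full; the proofs are below) =====
def Claim_equal_remove_k_occurrences : Prop := ∀ (arr : List Int) (k : Int), Dom_remove_k_occurrences arr k → Spec_remove_k_occurrences arr k (remove_k_occurrences arr k)

-- ===== LEMMAS AND PROOFS =====

-- closed form of A's inner while-loop on a positive count n
theorem pvInnerA_spec (n : Nat) (k j : Int) (hn : 1 ≤ n) :
    pvInnerA (n : Int) k j =
      if (n : Int) ≤ k then (k - n, j + 1, false) else ((if 0 < k then 0 else k), j, true) := by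
  induction n generalizing k j with
  | zero => omega
  | succ m ih =>
    have hc : (0 : Int) < ((m + 1 : Nat) : Int) := by push_cast; omega
    rw [pvInnerA, dif_pos hc]
    by_cases hk : 0 < k
    · rw [if_pos hk]
      have h1 : ((m + 1 : Nat) : Int) - 1 = (m : Int) := by push_cast; ring
      rw [h1]
      by_cases hm : m = 0
      · subst hm
        rw [if_pos (by norm_num : ((0 : Nat) : Int) < 1)]
        rw [pvInnerA, dif_neg (by norm_num : ¬ (0 : Int) < ((0 : Nat) : Int))]
        rw [if_pos (by push_cast; omega : ((0 + 1 : Nat) : Int) ≤ k)]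
        simp only [Prod.mk.injEq, and_true]
        norm_num
      · rw [if_neg (by push_cast; omega : ¬ ((m : Nat) : Int) < 1)]
        rw [ih (k - 1) j (by omega)]
        by_cases hle : ((m + 1 : Nat) : Int) ≤ k
        · rw [if_pos (by push_cast at hle ⊢; omega : ((m : Nat) : Int) ≤ k - 1), if_pos hle]
          simp only [Prod.mk.injEq, and_true]
          push_cast; ring
        · rw [if_neg (by push_cast at hle ⊢; omega : ¬ ((m : Nat) : Int) ≤ k - 1), if_neg hle,
              if_pos hk]
          by_cases h2 : 0 < k - 1
          · rw [if_pos h2]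
          · rw [if_neg h2]
            have : k - 1 = 0 := by omega
            rw [this]
    · rw [if_neg hk, if_neg (by push_cast; omega : ¬ ((m + 1 : Nat) : Int) ≤ k), if_neg hk]

-- A's loop over (key, count) pairs equals B's loop over the counts alone
theorem pvLoopA_eq_pvLoopB (items : List (Int × Int)) (k j : Int)
    (hpos : ∀ p ∈ items, ∃ n : Nat, 1 ≤ n ∧ p.2 = (n : Int)) :
    pvLoopA items k j = pvLoopB (items.map (·.2)) k j := by
  induction items generalizing k j with
  | nil => rfl
  | cons p rest ih =>
    obtain ⟨key, c⟩ := p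
    obtain ⟨n, hn1, hc⟩ := hpos (key, c) (List.mem_cons_self)
    simp only at hc
    subst hc
    show (match pvInnerA (n : Int) k j with
          | (k', j', flag) => if flag then j' else pvLoopA rest k' j') = _
    rw [pvInnerA_spec n k j hn1]
    by_cases hle : (n : Int) ≤ k
    · rw [if_pos hle]
      simp only [List.map_cons, pvLoopB, if_neg (by omega : ¬ k < (n : Int))]
      exact ih (k - n) (j + 1) (fun p hp => hpos p (List.mem_cons_of_mem _ hp))
    · rw [if_neg hle]
      simp only [List.map_cons, pvLoopB, if_pos (by omega : k < (n : Int))]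
      simp

-- the values of A's items-sorted-by-count are B's sorted values
theorem map_snd_sorted_eq (items : List (Int × Int)) :
    (PySem.List.sorted items (fun p => p.2) false).map (·.2)
      = PySem.List.sorted (items.map (·.2)) (fun c => c) false := by
  apply PySem.List.eq_of_perm_of_pairwise_le_of_injective (fun c : Int => c) (fun _ _ h => h)
  · exact ((PySem.List.sorted_perm items (fun p => p.2) false).map _).trans
      (PySem.List.sorted_perm (items.map (·.2)) (fun c => c) false).symm
  · exact List.Pairwise.map _ (fun _ _ h => h)
      (PySem.List.sorted_pairwise items (fun p => p.2))
  · exact PySem.List.sorted_pairwise (items.map (·.2)) (fun c => c)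

-- ===== VERDICT (by name: the statement is the Claim_ definition above) =====
theorem remove_k_occurrences_spec : Claim_equal_remove_k_occurrences := by
  intro arr k _
  unfold Spec_remove_k_occurrences remove_k_occurrences remove_k_occurrences_alt
  have hvals : (PySem.Dict.counter arr).values
      = ((PySem.Dict.counter arr).items).map (·.2) := rfl
  have hmap := map_snd_sorted_eq (PySem.Dict.counter arr).items
  have hpos : ∀ p ∈ PySem.List.sorted (PySem.Dict.counter arr).items (fun p => p.2) false,
      ∃ n : Nat, 1 ≤ n ∧ p.2 = (n : Int) := by
    intro p hp
    rw [PySem.List.mem_sorted] at hp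
    rw [PySem.Dict.items_counter] at hp
    obtain ⟨key, hkey, rfl⟩ := List.mem_map.mp hp
    refine ⟨arr.count key, ?_, rfl⟩
    have : key ∈ arr := (PySem.Set.mem_ofList _ _).mp hkey
    exact List.one_le_count_iff.mpr this
  rw [pvLoopA_eq_pvLoopB _ k 0 hpos, hmap, hvals]
  have hlen : (PySem.List.sorted (PySem.Dict.counter arr).items (fun p => p.2) false).length
      = (PySem.List.sorted (((PySem.Dict.counter arr).items).map (·.2)) (fun c => c) false).length := by
    rw [PySem.List.length_sorted, PySem.List.length_sorted, List.length_map]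
  rw [hlen]
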